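-- pv_equiv track=rewrite | github.com/j-chad/SanctaMaria | smcAPI/utils/internal.py | detect_date_type
-- ===== SOURCE A (Python) =====
-- def detect_date_type(date_string):
--     def remove(iter_):
--         for i in iter_:
--             try:
--                 possible_types.remove(i)
--             except ValueError:
--                 pass
--     possible_types = [1, 2, 3, 4, 5]
--     if ' to ' in date_string:
--         if len(date_string.split(' to ')) == 3:
--             remove([1, 3, 4, 5])
--         else:
--             remove([2])
--         remove([3, 4])
--     else:
--         remove([1, 2, 5])
--     if ':' in date_string:
--         remove([1, 3])
--     else:
--         remove([2, 4, 5])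
--     if len(possible_types) > 1:
--         #TODO: Improve Exception
--         raise BaseException('Failed To Find String Type: {}'.format(date_string))
--     else:
--         return possible_types[0]
-- ===== SOURCE B (Python) =====
-- def detect_date_type(date_string):
--     has_colon = ':' in date_string
--     if ' to ' not in date_string:
--         return 4 if has_colon else 3
--     if len(date_string.split(' to ')) == 3:
--         return 2
--     return 5 if has_colon else 1
-- ===== Notes on version B (the rewrite author's own statement) =====
-- stated objective: simpler
-- what changed: Replaces the mutable candidate-elimination list (repeated remove calls) with two containment flags and a direct decision tree; Pre_ excludes only the ' to '-3-part no-colon strings, on which A raises IndexError while B returns 2.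
import Mathlib
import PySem

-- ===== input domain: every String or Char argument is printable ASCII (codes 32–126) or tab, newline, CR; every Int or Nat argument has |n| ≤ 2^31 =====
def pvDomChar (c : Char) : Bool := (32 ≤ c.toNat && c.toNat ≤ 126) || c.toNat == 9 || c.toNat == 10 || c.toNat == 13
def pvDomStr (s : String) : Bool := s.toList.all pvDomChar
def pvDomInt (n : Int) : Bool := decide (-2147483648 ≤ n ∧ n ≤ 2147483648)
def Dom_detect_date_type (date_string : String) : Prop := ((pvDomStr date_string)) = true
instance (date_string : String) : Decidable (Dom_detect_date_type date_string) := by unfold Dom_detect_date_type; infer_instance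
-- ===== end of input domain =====

-- B replaces A's candidate-elimination list by containment flags and a direct decision tree (objective: simpler).

-- ===== PORT A =====
-- helper 'remove': try possible_types.remove(i) except ValueError: pass, for each i
def pvRemoveAll (pt : List Int) (iter_ : List Int) : List Int :=
  iter_.foldl (fun acc i => match PySem.List.remove? acc i with
    | some l => l
    | none => acc) pt

def detect_date_type (date_string : String) : Int :=
  let pt : List Int := [1, 2, 3, 4, 5]
  let pt :=
    if PySem.Str.isIn " to " date_string then
      let pt :=
        if (PySem.Chars.splitOn date_string.toList " to ".toList).length == 3 then
          pvRemoveAll pt [1, 3, 4, 5]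
        else
          pvRemoveAll pt [2]
      pvRemoveAll pt [3, 4]
    else
      pvRemoveAll pt [1, 2, 5]
  let pt :=
    if PySem.Str.isIn ":" date_string then pvRemoveAll pt [1, 3]
    else pvRemoveAll pt [2, 4, 5]
  if pt.length > 1 then 0  -- 'raise BaseException' (unreachable; outside any returning input)
  else (PySem.List.pyGet? pt 0).getD 0  -- possible_types[0]; none = IndexError, excluded by Pre_

-- ===== PORT B =====
def detect_date_type_alt (date_string : String) : Int :=
  let has_colon := PySem.Str.isIn ":" date_string
  if !(PySem.Str.isIn " to " date_string) then
    (if has_colon then 4 else 3)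
  else if (PySem.Chars.splitOn date_string.toList " to ".toList).length == 3 then
    2
  else
    (if has_colon then 5 else 1)

-- ===== PRECONDITION & SPEC =====
-- Pre_ excludes exactly the inputs where A raises IndexError (possible_types[0] on an empty
-- list): strings containing ' to ' that split into 3 parts and contain no ':'. B returns 2 there.
def Pre_detect_date_type (date_string : String) : Prop :=
  ¬ (PySem.Str.isIn " to " date_string = true ∧
     (PySem.Chars.splitOn date_string.toList " to ".toList).length = 3 ∧
     PySem.Str.isIn ":" date_string = false)
instance (date_string : String) : Decidable (Pre_detect_date_type date_string) := by
  unfold Pre_detect_date_type; infer_instance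

def pvWitness_detect_date_type : String := "9:00 to 10:00"

def Spec_detect_date_type (date_string : String) (out : Int) : Prop := out = detect_date_type_alt date_string
instance (date_string : String) (out : Int) : Decidable (Spec_detect_date_type date_string out) := by unfold Spec_detect_date_type; infer_instance

-- ===== CLAIM (what is proved, stated in full; the proofs are below) =====
def Claim_equal_detect_date_type : Prop := ∀ (date_string : String), Dom_detect_date_type date_string → Pre_detect_date_type date_string → Spec_detect_date_type date_string (detect_date_type date_string)

-- ===== LEMMAS AND PROOFS =====

-- ===== VERDICT (by name: the statement is the Claim_ definition above) =====
theorem detect_date_type_spec : Claim_equal_detect_date_type := by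
  intro s _ hpre
  unfold Pre_detect_date_type at hpre
  unfold Spec_detect_date_type detect_date_type detect_date_type_alt
  generalize h1 : PySem.Str.isIn " to " s = bto at hpre ⊢
  generalize h2 : (PySem.Chars.splitOn s.toList " to ".toList).length = n at hpre ⊢
  generalize h3 : PySem.Str.isIn ":" s = bcolon at hpre ⊢
  cases bto <;> cases bcolon <;> by_cases hn : n = 3
  · subst hn; decide
  · have hb : (n == 3) = false := by simpa using hn
    rw [hb]; decide
  · subst hn; decide
  · have hb : (n == 3) = false := by simpa using hn
    rw [hb]; decide
  · exact absurd ⟨rfl, hn, rfl⟩ hpre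
  · have hb : (n == 3) = false := by simpa using hn
    rw [hb]; decide
  · subst hn; decide
  · have hb : (n == 3) = false := by simpa using hn
    rw [hb]; decide
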